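-- pv_equiv track=rewrite | github.com/amolparande-tomtom/addressranges | hnrAdressRangesArrayFormation_V1.py | old_v1correct_hnr_array
-- ===== SOURCE A (Python) =====
-- def old_v1correct_hnr_array(arr):
--     if arr is None:
--         return []
--     corrected_arr = []
--     for item in arr:
--         if ';' in item:
--             corrected_arr.extend(item.split(';'))
--         else:
--             corrected_arr.append(item)
--     return corrected_arr
-- ===== SOURCE B (Python) =====
-- def old_v1correct_hnr_array(arr):
--     if not arr:
--         return []
--     return ';'.join(arr).split(';')
-- ===== Notes on version B (the rewrite author's own statement) =====
-- stated objective: idiomatic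
-- what changed: Replaces the per-item branch-and-extend loop with a single join of the whole list followed by one split on ';' (guarding the None/empty case).
import Mathlib
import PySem

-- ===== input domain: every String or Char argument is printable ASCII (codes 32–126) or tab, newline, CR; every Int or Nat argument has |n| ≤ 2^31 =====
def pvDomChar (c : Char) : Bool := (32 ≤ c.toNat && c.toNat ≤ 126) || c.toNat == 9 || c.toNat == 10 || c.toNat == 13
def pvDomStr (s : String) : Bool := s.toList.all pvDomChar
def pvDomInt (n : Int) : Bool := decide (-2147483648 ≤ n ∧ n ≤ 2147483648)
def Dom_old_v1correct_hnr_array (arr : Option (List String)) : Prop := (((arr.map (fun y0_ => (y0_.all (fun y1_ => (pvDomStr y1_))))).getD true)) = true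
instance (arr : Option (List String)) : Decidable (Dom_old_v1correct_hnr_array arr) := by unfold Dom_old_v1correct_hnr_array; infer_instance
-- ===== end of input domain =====

-- ===== PORT A =====
-- B replaces A's per-item branch/extend loop by one join-then-split pass (idiomatic; same cost).
def old_v1correct_hnr_array (arr : Option (List String)) : List String :=
  match arr with
  | none => []
  | some l =>
    l.foldl (fun corrected_arr item =>
      if PySem.Str.isIn ";" item then
        -- item.split(';'): sep ";" is nonempty, so split? is always `some`
        corrected_arr ++ (PySem.Str.split? item ";").getD []
      else
        corrected_arr ++ [item]) []

-- ===== PORT B =====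
def old_v1correct_hnr_array_alt (arr : Option (List String)) : List String :=
  match arr with
  | none => []          -- `if not arr: return []`
  | some [] => []
  | some l =>
    -- ';'.join(arr).split(';'); sep ";" is nonempty, so split? is always `some`
    (PySem.Str.split? (PySem.Str.join ";" l) ";").getD []

-- ===== PRECONDITION & SPEC =====
def Spec_old_v1correct_hnr_array (arr : Option (List String)) (out : List String) : Prop := out = old_v1correct_hnr_array_alt arr
instance (arr : Option (List String)) (out : List String) : Decidable (Spec_old_v1correct_hnr_array arr out) := by unfold Spec_old_v1correct_hnr_array; infer_instance

-- ===== CLAIM (what is proved, stated in full; the proofs are below) =====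
def Claim_equal_old_v1correct_hnr_array : Prop := ∀ (arr : Option (List String)), Dom_old_v1correct_hnr_array arr → Spec_old_v1correct_hnr_array arr (old_v1correct_hnr_array arr)

-- ===== LEMMAS AND PROOFS =====

-- Reference split on a single separator character c.
def sres (c : Char) : List Char → List (List Char)
  | [] => [[]]
  | x :: xs => if x = c then [] :: sres c xs else (sres c xs).modifyHead (x :: ·)

theorem sres_ne_nil (c : Char) (s : List Char) : sres c s ≠ [] := by
  induction s with
  | nil => simp [sres]
  | cons x xs ih =>
    simp only [sres]
    split_ifs
    · simp
    · cases h : sres c xs with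
      | nil => exact absurd h ih
      | cons a t => simp

theorem splitOn_go_eq (c : Char) (s : List Char) :
    ∀ (fuel : Nat) (cur : List Char) (acc : List (List Char)), s.length ≤ fuel →
      PySem.Chars.splitOn.go [c] fuel s cur acc
        = acc.reverse ++ (sres c s).modifyHead (cur.reverse ++ ·) := by
  induction s with
  | nil =>
    intro fuel cur acc _
    cases fuel with
    | zero => simp [PySem.Chars.splitOn.go, sres]
    | succ f => simp [PySem.Chars.splitOn.go, sres]
  | cons x xs ih =>
    intro fuel cur acc hle
    cases fuel with
    | zero => simp at hle
    | succ f =>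
      by_cases hx : x = c
      · subst hx
        have hpre : List.isPrefixOf [x] (x :: xs) = true := by simp [List.isPrefixOf]
        simp only [PySem.Chars.splitOn.go, hpre, if_pos, List.length_cons, List.length_nil,
          List.drop_succ_cons, List.drop_zero]
        rw [ih f [] (cur.reverse :: acc) (by simpa using Nat.lt_succ_iff.mp (by simpa using hle))]
        cases h : sres x xs with
        | nil => exact absurd h (sres_ne_nil x xs)
        | cons a t => simp [sres, h]
      · have hpre : List.isPrefixOf [c] (x :: xs) = false := by
          simp [List.isPrefixOf]
          exact fun h => absurd h.symm hx
        simp only [PySem.Chars.splitOn.go, hpre, Bool.false_eq_true, if_false]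
        rw [ih f (x :: cur) acc (by simpa using Nat.lt_succ_iff.mp (by simpa using hle))]
        cases h : sres c xs with
        | nil => exact absurd h (sres_ne_nil c xs)
        | cons a t => simp [sres, h, hx]

theorem splitOn_eq_sres (c : Char) (s : List Char) :
    PySem.Chars.splitOn s [c] = sres c s := by
  unfold PySem.Chars.splitOn
  rw [splitOn_go_eq c s (s.length + 1) [] [] (by omega)]
  cases h : sres c s with
  | nil => exact absurd h (sres_ne_nil c s)
  | cons a t => simp

theorem sres_of_not_mem (c : Char) (s : List Char) (h : c ∉ s) : sres c s = [s] := by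
  induction s with
  | nil => simp [sres]
  | cons x xs ih =>
    simp only [List.mem_cons, not_or] at h
    simp [sres, (Ne.symm h.1 : ¬ x = c), ih h.2]

theorem sres_append (c : Char) (a b : List Char) :
    sres c (a ++ c :: b) = sres c a ++ sres c b := by
  induction a with
  | nil => simp [sres]
  | cons x xs ih =>
    by_cases hx : x = c
    · subst hx; simp [sres, ih]
    · simp only [List.cons_append, sres, hx, if_false, ih]
      cases h : sres c xs with
      | nil => exact absurd h (sres_ne_nil c xs)
      | cons p t => simp

theorem sres_join (c : Char) (l : List (List Char)) (h : l ≠ []) :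
    sres c (PySem.Chars.join [c] l) = l.flatMap (sres c) := by
  induction l with
  | nil => exact absurd rfl h
  | cons p rest ih =>
    cases rest with
    | nil => simp [PySem.Chars.join_singleton]
    | cons q t =>
      rw [PySem.Chars.join_cons_cons]
      have : p ++ [c] ++ PySem.Chars.join [c] (q :: t) = p ++ c :: PySem.Chars.join [c] (q :: t) := by simp
      rw [this, sres_append, ih (by simp)]
      simp

-- the String-level split, read through toList
theorem split_getD_toList (s : String) :
    ((PySem.Str.split? s ";").getD []).map String.toList = sres ';' s.toList := by
  have hb := PySem.Str.split?_map s ";"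
  have hsep : (";" : String).toList = [';'] := by decide
  rw [hsep] at hb
  simp only [PySem.Chars.split?, List.isEmpty_cons, Bool.false_eq_true, if_false] at hb
  cases h : PySem.Str.split? s ";" with
  | none => rw [h] at hb; simp at hb
  | some parts =>
    rw [h] at hb
    rw [Option.map_some] at hb
    have hb2 : parts.map String.toList = PySem.Chars.splitOn s.toList [';'] := Option.some.inj hb
    simp only [Option.getD_some]
    rw [hb2, splitOn_eq_sres]

-- A's loop, read through toList: it concatenates the splits of all items
theorem foldlA_toList (l : List String) (acc : List String) :
    (l.foldl (fun corrected_arr item =>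
      if PySem.Str.isIn ";" item then
        corrected_arr ++ (PySem.Str.split? item ";").getD []
      else
        corrected_arr ++ [item]) acc).map String.toList
      = acc.map String.toList ++ (l.map String.toList).flatMap (sres ';') := by
  induction l generalizing acc with
  | nil => simp
  | cons item rest ih =>
    simp only [List.foldl_cons, List.map_cons, List.flatMap_cons]
    by_cases hin : PySem.Str.isIn ";" item = true
    · rw [if_pos hin, ih]
      simp [split_getD_toList, List.append_assoc]
    · rw [if_neg hin, ih]
      have hmem : ';' ∉ item.toList := by
        intro hc
        obtain ⟨u, v, huv⟩ := List.append_of_mem hc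
        have : PySem.Str.isIn ";" item = true := by
          rw [PySem.Str.isIn_eq]
          rw [PySem.Chars.isIn_iff_infix]
          exact ⟨u, v, by simpa using huv.symm⟩
        exact hin this
      simp [sres_of_not_mem ';' item.toList hmem, List.append_assoc]

-- ===== VERDICT (by name: the statement is the Claim_ definition above) =====
theorem old_v1correct_hnr_array_spec : Claim_equal_old_v1correct_hnr_array := by
  intro arr _
  show old_v1correct_hnr_array arr = old_v1correct_hnr_array_alt arr
  match arr with
  | none => rfl
  | some [] => rfl
  | some (s :: rest) =>
    apply List.map_injective_iff.mpr (fun a b h => String.toList_inj.mp h)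
    rw [show old_v1correct_hnr_array (some (s :: rest))
        = (s :: rest).foldl (fun corrected_arr item =>
            if PySem.Str.isIn ";" item then
              corrected_arr ++ (PySem.Str.split? item ";").getD []
            else
              corrected_arr ++ [item]) [] from rfl]
    rw [foldlA_toList]
    rw [show old_v1correct_hnr_array_alt (some (s :: rest))
        = (PySem.Str.split? (PySem.Str.join ";" (s :: rest)) ";").getD [] from rfl]
    rw [split_getD_toList]
    have hj : (PySem.Str.join ";" (s :: rest)).toList
        = PySem.Chars.join [';'] ((s :: rest).map String.toList) := by
      simp
    rw [hj, sres_join ';' _ (by simp)]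
    simp
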